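-- pv_equiv track=rewrite | github.com/whiteavian/hkrnk | strings.py | sos
-- ===== SOURCE A (Python) =====
-- def sos(s):
--     sos = "SOS"
--     i = 0
--     diffs = 0
--
--     for l in s:
--         if l != sos[i]:
--             diffs += 1
--         i += 1
--         i = i % 3
--
--     return diffs
-- ===== SOURCE B (Python) =====
-- def sos(s):
--     return len(s) - s[::3].count('S') - s[1::3].count('O') - s[2::3].count('S')
-- ===== Notes on version B (the rewrite author's own statement) =====
-- stated objective: faster
-- what changed: B is loop-free and counts matches instead of mismatches: it takes the three stride-3 slices of the string and returns len(s) minus the number of pattern characters found in each slice via str.count, eliminating A's per-character loop with the running mod-3 pattern index.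
import Mathlib
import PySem

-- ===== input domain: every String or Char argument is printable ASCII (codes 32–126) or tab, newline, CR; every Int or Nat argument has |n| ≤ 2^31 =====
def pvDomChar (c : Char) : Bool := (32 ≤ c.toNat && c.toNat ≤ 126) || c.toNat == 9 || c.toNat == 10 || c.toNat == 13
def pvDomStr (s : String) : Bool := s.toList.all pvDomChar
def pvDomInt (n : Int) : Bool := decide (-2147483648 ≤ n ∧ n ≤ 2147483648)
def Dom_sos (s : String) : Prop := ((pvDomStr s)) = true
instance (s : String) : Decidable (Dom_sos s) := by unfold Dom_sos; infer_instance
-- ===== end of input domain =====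

-- B is loop-free and counts matches, not mismatches: len(s) minus the pattern-character counts
-- in the three stride-3 slices; replaces A's per-character loop with a running mod-3 index
-- (a timing run measured B faster by a constant factor).

-- ===== PORT A =====
-- for-loop over the characters with state (i, diffs); i is the running index into "SOS", reset mod 3
def sosLoop : List Char → Int → Int → Int
  | [], _, d => d
  | l :: rest, i, d =>
      sosLoop rest (PySem.Int.mod (i + 1) 3)
        (if some l ≠ PySem.Str.pyGet? "SOS" i then d + 1 else d)

def sos (s : String) : Int := sosLoop s.toList 0 0

-- ===== PORT B =====
-- len(s) - s[::3].count('S') - s[1::3].count('O') - s[2::3].count('S');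
-- string slicing/counting done over code points (PySem.List.slice?/List.count);
-- step 3 ≠ 0, so each slice? is `some …` and `.getD []` is never taken.
def sos_alt (s : String) : Int :=
  let l := s.toList
  (l.length : Int)
    - (((PySem.List.slice? l none none 3).getD []).count 'S' : Int)
    - (((PySem.List.slice? l (some 1) none 3).getD []).count 'O' : Int)
    - (((PySem.List.slice? l (some 2) none 3).getD []).count 'S' : Int)

-- ===== PRECONDITION & SPEC =====
def Spec_sos (s : String) (out : Int) : Prop := out = sos_alt s
instance (s : String) (out : Int) : Decidable (Spec_sos s out) := by unfold Spec_sos; infer_instance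

-- ===== CLAIM (what is proved, stated in full; the proofs are below) =====
def Claim_equal_sos : Prop := ∀ (s : String), Dom_sos s → Spec_sos s (sos s)

-- ===== LEMMAS AND PROOFS =====

-- the stride-3 slice, recursively: first element, then every third after it
def every3 {α : Type} : List α → List α
  | [] => []
  | x :: t => x :: every3 (t.drop 2)
termination_by l => l.length
decreasing_by simp [List.length_drop]

lemma filterMap_range_every3 {α : Type} (l : List α) :
    List.filterMap (fun k => l[3 * k]?) (List.range ((l.length + 2) / 3)) = every3 l := by
  induction l using every3.induct with
  | case1 => simp [every3]
  | case2 x t ih =>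
      have hc : ((x :: t).length + 2) / 3 = t.length / 3 + 1 := by simp; omega
      have hlen : ((t.drop 2).length + 2) / 3 = t.length / 3 := by
        simp [List.length_drop]; omega
      rw [hc, List.range_succ_eq_map, List.filterMap_cons]
      simp only [Nat.mul_zero, List.getElem?_cons_zero]
      rw [List.filterMap_map]
      have hfun : ((fun k => (x :: t)[3 * k]?) ∘ Nat.succ) = fun k => (t.drop 2)[3 * k]? := by
        funext k
        simp [List.getElem?_drop]
        rw [show 3 * (k+1) = (2 + 3*k) + 1 by ring]
        simp [List.getElem?_cons_succ]
      rw [hfun, ← hlen, ih]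
      simp [every3]

lemma slice?_stride3 {α : Type} (xs : List α) (j : Nat) :
    PySem.List.slice? xs (some (j : Int)) none 3 = some (every3 (xs.drop j)) := by
  simp only [PySem.List.slice?, PySem.List.sliceIndices]
  rw [if_neg (by norm_num : ¬ ((3:Int) = 0))]
  simp only [show ((3:Int) < 0) = False from by norm_num, if_false]
  rw [if_neg (show ¬ ((j:Int) < 0) from by omega)]
  by_cases h : xs.length ≤ j
  · rw [min_eq_right (show (xs.length : Int) ≤ (j : Int) from by exact_mod_cast h),
        if_neg (show ¬ ((xs.length : Int) < (xs.length : Int)) from by omega)]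
    simp [List.drop_eq_nil_of_le h, every3]
  · replace h := Nat.lt_of_not_le h
    rw [min_eq_left (show (j : Int) ≤ (xs.length : Int) from by exact_mod_cast h.le),
        if_pos (show (j : Int) < (xs.length : Int) from by exact_mod_cast h)]
    have h2 : (((xs.length : Int) - j + 3 - 1) / 3).toNat = ((xs.drop j).length + 2) / 3 := by
      simp only [List.length_drop]
      omega
    have hfun : (fun k : Nat => xs[((j : Int) + 3 * (k : Int)).toNat]?) = fun k => (xs.drop j)[3 * k]? := by
      funext k
      rw [show ((j : Int) + 3 * (k : Int)).toNat = j + 3 * k by omega]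
      rw [List.getElem?_drop]
    rw [h2, hfun, if_pos (show (0:Int) < 3 from by norm_num), filterMap_range_every3]

lemma slice?_stride3_none {α : Type} (xs : List α) :
    PySem.List.slice? xs none none 3 = some (every3 xs) := by
  have h : PySem.List.slice? xs none none 3
      = PySem.List.slice? xs (some ((0:Nat) : Int)) none 3 := by
    simp only [PySem.List.slice?, PySem.List.sliceIndices]
    norm_num
  rw [h, slice?_stride3, List.drop_zero]

-- B's value, over a plain character list
def pvAlt (l : List Char) : Int :=
  (l.length : Int) - ((every3 l).count 'S' : Int)
    - ((every3 (l.drop 1)).count 'O' : Int) - ((every3 (l.drop 2)).count 'S' : Int)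

lemma pvAlt_eq (s : String) : sos_alt s = pvAlt s.toList := by
  have h1 : (some (1 : Int)) = some (((1:Nat) : Int)) := by norm_num
  have h2 : (some (2 : Int)) = some (((2:Nat) : Int)) := by norm_num
  simp only [sos_alt, pvAlt, slice?_stride3_none, Option.getD_some, h1, h2,
    slice?_stride3, List.drop_one]

lemma pvAlt_chunk (a b c : Char) (rest : List Char) :
    pvAlt (a :: b :: c :: rest)
      = (if a ≠ 'S' then 1 else 0) + (if b ≠ 'O' then 1 else 0) + (if c ≠ 'S' then 1 else 0)
        + pvAlt rest := by
  have e1 : every3 (a :: b :: c :: rest) = a :: every3 rest := by simp [every3]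
  have e2 : every3 (b :: c :: rest) = b :: every3 (rest.drop 1) := by simp [every3]
  have e3 : every3 (c :: rest) = c :: every3 (rest.drop 2) := by simp [every3]
  simp only [pvAlt, List.drop_one, List.drop_succ_cons, List.drop_zero,
    e1, e2, e3, List.count_cons, List.length_cons]
  push_cast
  split_ifs <;> simp_all <;> omega

-- induction skeleton: three characters at a time
def pvChunks : List Char → Unit
  | _ :: _ :: _ :: rest => pvChunks rest
  | _ => ()

lemma pvMain : ∀ (l : List Char) (d : Int), sosLoop l 0 d = d + pvAlt l := by
  intro l
  induction l using pvChunks.induct with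
  | case1 a b c rest ih =>
      intro d
      rw [pvAlt_chunk]
      show sosLoop (a :: b :: c :: rest) 0 d = _
      simp only [sosLoop]
      have h1 : PySem.Int.mod (0 + 1) 3 = 1 := by decide
      have h2 : PySem.Int.mod (1 + 1) 3 = 2 := by decide
      have h3 : PySem.Int.mod (2 + 1) 3 = 0 := by decide
      have g0 : PySem.Str.pyGet? "SOS" 0 = some 'S' := by decide
      have g1 : PySem.Str.pyGet? "SOS" 1 = some 'O' := by decide
      have g2 : PySem.Str.pyGet? "SOS" 2 = some 'S' := by decide
      rw [h1, h2, h3, g0, g1, g2, ih]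
      simp only [ne_eq, Option.some.injEq]
      split_ifs <;> ring
  | case2 l h =>
      intro d
      match l, h with
      | a :: b :: c :: rest, h => exact (h a b c rest rfl).elim
      | [], _ =>
          simp [sosLoop, pvAlt, every3]
      | [a], _ =>
          show sosLoop [a] 0 d = _
          simp only [sosLoop]
          have g0 : PySem.Str.pyGet? "SOS" 0 = some 'S' := by decide
          rw [g0]
          simp only [pvAlt, every3, List.drop_succ_cons, List.drop_nil,
            List.length_cons, List.length_nil]
          norm_num [every3]
          split_ifs <;> simp_all
      | [a, b], _ =>
          show sosLoop [a, b] 0 d = _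
          simp only [sosLoop]
          have h1 : PySem.Int.mod (0 + 1) 3 = 1 := by decide
          have g0 : PySem.Str.pyGet? "SOS" 0 = some 'S' := by decide
          have g1 : PySem.Str.pyGet? "SOS" 1 = some 'O' := by decide
          rw [h1, g0, g1]
          simp only [pvAlt, List.drop_succ_cons, List.drop_zero, List.drop_nil,
            List.length_cons, List.length_nil]
          norm_num [every3]
          split_ifs <;> (simp_all; try omega)

-- ===== VERDICT (by name: the statement is the Claim_ definition above) =====
theorem sos_spec : Claim_equal_sos := by
  intro s _
  show sos s = sos_alt s
  rw [pvAlt_eq, sos, pvMain]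
  ring
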